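-- pv_equiv track=rewrite | github.com/shahlab-ucla/acetree_py | tests/test_naming_comparison.py | _lineage_root
-- ===== SOURCE A (Python) =====
-- def _lineage_root(name: str) -> str:
--     """Get the founder lineage root of a Sulston name."""
--     if not name:
--         return ""
--     # Standard lineage prefixes
--     for prefix in ("ABa", "ABp", "EMS", "P2", "P3", "P4", "C", "D", "E", "MS",
--                    "AB", "P1", "P0"):
--         if name.startswith(prefix):
--             return prefix
--     return name
-- ===== SOURCE B (Python) =====
-- def _lineage_root(name: str) -> str:
--     """Get the founder lineage root of a Sulston name (character decision tree)."""
--     if not name: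
--         return ""
--     c = name[0]
--     if c == 'A':
--         if name.startswith("AB"):
--             if len(name) >= 3 and name[2] in "ap":
--                 return name[:3]
--             return "AB"
--         return name
--     if c == 'C' or c == 'D':
--         return c
--     if c == 'E':
--         return "EMS" if name.startswith("EMS") else "E"
--     if c == 'M':
--         return "MS" if name.startswith("MS") else name
--     if c == 'P':
--         if len(name) >= 2 and name[1] in "01234":
--             return name[:2]
--         return name
--     return name
-- ===== Notes on version B (the rewrite author's own statement) =====
-- stated objective: alternative
-- what changed: Replaces A's linear scan over the 13-prefix priority tuple with a character decision tree that dispatches on the first letter (and inspects at most two further characters), returning the prefix directly; correct because the first letter uniquely determines which prefixes can match.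
import Mathlib
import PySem

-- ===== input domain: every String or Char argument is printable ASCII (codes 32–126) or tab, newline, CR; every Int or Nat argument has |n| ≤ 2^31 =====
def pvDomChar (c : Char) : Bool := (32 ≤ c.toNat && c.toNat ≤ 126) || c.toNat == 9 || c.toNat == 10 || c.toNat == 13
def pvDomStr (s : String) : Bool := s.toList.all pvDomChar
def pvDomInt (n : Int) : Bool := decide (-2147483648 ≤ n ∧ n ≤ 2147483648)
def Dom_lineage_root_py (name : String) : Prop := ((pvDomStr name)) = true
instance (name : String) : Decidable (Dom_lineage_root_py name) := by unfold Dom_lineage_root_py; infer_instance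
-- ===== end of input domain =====

-- B replaces A's fixed-priority scan over 13 prefixes by a character decision tree dispatching on the first letter (alternative decomposition, same cost).


-- ===== PORT A =====
-- the tuple of prefixes A iterates over, in its priority order
def pvPrefixesA : List String :=
  ["ABa", "ABp", "EMS", "P2", "P3", "P4", "C", "D", "E", "MS", "AB", "P1", "P0"]

def lineage_root_py (name : String) : String :=
  if name = "" then ""
  else
    -- 'for prefix in (…): if name.startswith(prefix): return prefix' = first match
    match pvPrefixesA.find? (fun p => PySem.Str.startswith name p) with
    | some p => p
    | none => name

-- ===== PORT B =====
-- decision tree on the leading characters (Source B): name[k] with a length guard is the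
-- match on 'toList.drop k'; name[:k] is 'String.ofList (toList.take k)' — both exact here
def lineage_root_py_alt (name : String) : String :=
  match name.toList with
  | [] => ""                                   -- if not name: return ""
  | c :: rest =>
    if c = 'A' then
      if PySem.Str.startswith name "AB" then
        match name.toList.drop 2 with          -- len(name) >= 3 and name[2] in "ap"
        | c2 :: _ =>
          if c2 = 'a' ∨ c2 = 'p' then String.ofList (name.toList.take 3) else "AB"
        | [] => "AB"
      else name
    else if c = 'C' ∨ c = 'D' then String.ofList [c]
    else if c = 'E' then (if PySem.Str.startswith name "EMS" then "EMS" else "E")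
    else if c = 'M' then (if PySem.Str.startswith name "MS" then "MS" else name)
    else if c = 'P' then
      match rest with                          -- len(name) >= 2 and name[1] in "01234"
      | c2 :: _ =>
        if c2 ∈ ['0', '1', '2', '3', '4'] then String.ofList (name.toList.take 2) else name
      | [] => name
    else name

-- ===== PRECONDITION & SPEC =====
def Spec_lineage_root_py (name : String) (out : String) : Prop := out = lineage_root_py_alt name
instance (name : String) (out : String) : Decidable (Spec_lineage_root_py name out) := by unfold Spec_lineage_root_py; infer_instance

-- ===== CLAIM (what is proved, stated in full; the proofs are below) =====
def Claim_equal_lineage_root_py : Prop := ∀ (name : String), Dom_lineage_root_py name → Spec_lineage_root_py name (lineage_root_py name)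

-- ===== LEMMAS AND PROOFS =====

theorem pvMain (name : String) (c : Char) (rest : List Char) (hcs : name.toList = c :: rest) :
    lineage_root_py name = lineage_root_py_alt name := by
  have hne : ¬ name = "" := by intro h; rw [h] at hcs; simp at hcs
  simp only [lineage_root_py, lineage_root_py_alt, pvPrefixesA, hne, if_false, hcs,
    PySem.Str.startswith_eq, PySem.Chars.startswith, List.find?]
  by_cases hA : c = 'A'
  · subst hA
    rcases rest with _ | ⟨c2, rest2⟩
    · simp [List.isPrefixOf]
    · by_cases hB : c2 = 'B'
      · subst hB
        rcases rest2 with _ | ⟨c3, rest3⟩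
        · simp [List.isPrefixOf]
        · by_cases ha : c3 = 'a'
          · subst ha; simp [List.isPrefixOf]
          · by_cases hp : c3 = 'p'
            · subst hp; simp [List.isPrefixOf]
            · have ea : ('a' == c3) = false := by simp [Ne.symm ha]
              have ep : ('p' == c3) = false := by simp [Ne.symm hp]
              simp [List.isPrefixOf, ea, ep, ha, hp]
      · have eb : ('B' == c2) = false := by simp [Ne.symm hB]
        simp [List.isPrefixOf, eb]
  · by_cases hC : c = 'C'
    · subst hC; simp [List.isPrefixOf]
    · by_cases hD : c = 'D'
      · subst hD; simp [List.isPrefixOf]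
      · by_cases hE : c = 'E'
        · subst hE
          rcases rest with _ | ⟨c2, rest2⟩
          · simp [List.isPrefixOf]
          · by_cases hM2 : c2 = 'M'
            · subst hM2
              rcases rest2 with _ | ⟨c3, rest3⟩
              · simp [List.isPrefixOf]
              · by_cases hS : c3 = 'S'
                · subst hS; simp [List.isPrefixOf]
                · have es : ('S' == c3) = false := by simp [Ne.symm hS]
                  simp [List.isPrefixOf, es]
            · have em : ('M' == c2) = false := by simp [Ne.symm hM2]
              simp [List.isPrefixOf, em]
        · by_cases hM : c = 'M'
          · subst hM
            rcases rest with _ | ⟨c2, rest2⟩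
            · simp [List.isPrefixOf]
            · by_cases hS : c2 = 'S'
              · subst hS; simp [List.isPrefixOf]
              · have es : ('S' == c2) = false := by simp [Ne.symm hS]
                simp [List.isPrefixOf, es]
          · by_cases hP : c = 'P'
            · subst hP
              rcases rest with _ | ⟨c2, rest2⟩
              · simp [List.isPrefixOf]
              · by_cases h0 : c2 = '0'
                · subst h0; simp [List.isPrefixOf]
                · by_cases h1 : c2 = '1'
                  · subst h1; simp [List.isPrefixOf]
                  · by_cases h2 : c2 = '2'
                    · subst h2; simp [List.isPrefixOf]
                    · by_cases h3 : c2 = '3'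
                      · subst h3; simp [List.isPrefixOf]
                      · by_cases h4 : c2 = '4'
                        · subst h4; simp [List.isPrefixOf]
                        · have e0 : ('0' == c2) = false := by simp [Ne.symm h0]
                          have e1 : ('1' == c2) = false := by simp [Ne.symm h1]
                          have e2 : ('2' == c2) = false := by simp [Ne.symm h2]
                          have e3 : ('3' == c2) = false := by simp [Ne.symm h3]
                          have e4 : ('4' == c2) = false := by simp [Ne.symm h4]
                          simp [List.isPrefixOf, e0, e1, e2, e3, e4, h0, h1, h2, h3, h4]
            · have eA : ('A' == c) = false := by simp [Ne.symm hA]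
              have eC : ('C' == c) = false := by simp [Ne.symm hC]
              have eD : ('D' == c) = false := by simp [Ne.symm hD]
              have eE : ('E' == c) = false := by simp [Ne.symm hE]
              have eM : ('M' == c) = false := by simp [Ne.symm hM]
              have eP : ('P' == c) = false := by simp [Ne.symm hP]
              simp [List.isPrefixOf, eA, eC, eD, eE, eM, eP, hA, hC, hD, hE, hM, hP]

-- ===== VERDICT (by name: the statement is the Claim_ definition above) =====
theorem lineage_root_py_spec : Claim_equal_lineage_root_py := by
  intro name _
  unfold Spec_lineage_root_py
  rcases hcs : name.toList with _ | ⟨c, rest⟩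
  · have h : name = "" := by have := congrArg String.ofList hcs; simpa using this
    subst h; rfl
  · exact pvMain name c rest hcs
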